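-- pv_equiv track=rewrite | github.com/charouzic/algoexpert | passThroughMatrix.py | passThroughMatrix
-- ===== SOURCE A (Python) =====
-- def passThroughMatrix(matrix):
--     # keep track of negative (if there are only negative)
--
--     noSwitches = 0
--     zeros = 0
--     negatives = 0
--     positives = 0
--
--     noRows = len(matrix)
--     noCols = len(matrix[0])
--
--     visited = [[False for _ in range(noCols)] for _ in range(noRows)]
--
--     for row in range(noRows):
--         for col in range(noCols):
--
--             if matrix[row][col] < 0:
--                 negatives += 1
--                 canSwitch = hasPositiveNeighbor(matrix, row, col, visited)
--                 if canSwitch: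
--                     matrix[row][col] = matrix[row][col] * (-1)
--                     visited[row][col] = True
--                     noSwitches += 1
--             elif matrix[row][col] == 0:
--                 zeros += 1
--
--             else:
--                 positives += 1
--
--
--     return noSwitches, negatives, positives,zeros
--
-- def hasPositiveNeighbor(matrix, row, col, visited):
--     prevCol = col - 1
--     nextCol = col + 1
--     prevRow = row - 1
--     nextRow = row + 1
--
--     noRows = len(matrix)
--     noCols = len(matrix[0])
--
--     if prevCol >= 0 and not visited[row][prevCol] and matrix[row][prevCol] > 0 :
--         return True
--
--     if nextCol < noCols and not visited[row][nextCol] and matrix[row][nextCol] > 0: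
--         return True
--
--     if prevRow >= 0 and not visited[prevRow][col] and matrix[prevRow][col] > 0:
--         return True
--
--     if nextRow < noRows and not visited[nextRow][col] and matrix[nextRow][col] > 0:
--         return True
--
--     return False
-- ===== SOURCE B (Python) =====
-- def passThroughMatrix(matrix):
--     # Equivalent return value; A's interleaved visited/mutation bookkeeping reduces to
--     # "a negative cell switches iff some orthogonal neighbor was ORIGINALLY positive",
--     # so all decisions are read off the untouched matrix first and the switched cells
--     # are negated afterwards (same in-place mutation of `matrix` as A).
--     rows, cols = len(matrix), len(matrix[0])
--
--     def pos(r, c):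
--         return 0 <= r < rows and 0 <= c < cols and matrix[r][c] > 0
--
--     cells = [(r, c) for r in range(rows) for c in range(cols)]
--     negatives = sum(matrix[r][c] < 0 for r, c in cells)
--     zeros = sum(matrix[r][c] == 0 for r, c in cells)
--     positives = rows * cols - negatives - zeros
--     switchable = [(r, c) for r, c in cells
--                   if matrix[r][c] < 0
--                   and (pos(r, c - 1) or pos(r, c + 1) or pos(r - 1, c) or pos(r + 1, c))]
--     for r, c in switchable:
--         matrix[r][c] = -matrix[r][c]
--     return len(switchable), negatives, positives, zeros
-- ===== Notes on version B (the rewrite author's own statement) =====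
-- stated objective: simpler
-- what changed: Replaces A's interleaved visited-matrix bookkeeping and mutation-during-scan with a read-only pass over the untouched matrix (comprehension-based counts, positives by arithmetic, switch set as a filter, mutation done afterwards), exploiting that 'neighbor positive and unvisited' in A's scan is exactly 'neighbor originally positive'.
import Mathlib
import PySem

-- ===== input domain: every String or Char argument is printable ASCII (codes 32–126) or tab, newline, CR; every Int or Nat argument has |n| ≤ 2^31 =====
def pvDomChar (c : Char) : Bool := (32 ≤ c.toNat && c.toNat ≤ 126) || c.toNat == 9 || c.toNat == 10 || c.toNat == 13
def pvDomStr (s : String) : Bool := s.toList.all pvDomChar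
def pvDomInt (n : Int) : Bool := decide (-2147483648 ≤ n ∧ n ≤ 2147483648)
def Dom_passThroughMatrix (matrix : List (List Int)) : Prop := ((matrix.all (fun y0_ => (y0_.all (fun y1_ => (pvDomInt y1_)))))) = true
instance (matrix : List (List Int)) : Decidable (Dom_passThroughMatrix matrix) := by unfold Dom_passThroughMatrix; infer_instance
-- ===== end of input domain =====

-- B replaces A's interleaved visited-array bookkeeping with read-only counting passes over
-- the untouched matrix (objective: simpler). Both Pythons mutate `matrix` in place identically;
-- the equivalence proved here is about the return value.

-- shared 2-d read: Python's m[r][c] (all indices are guarded nonnegative and in range in both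
-- programs, so a Nat-indexed getD read is exact on Pre_)
def pvGet2 {α : Type} (d : α) (m : List (List α)) (r c : Nat) : α := (m.getD r []).getD c d

-- ===== PORT A =====
-- A-side helpers: in-place update matrix[r][c] = x
def pvSet2 {α : Type} (m : List (List α)) (r c : Nat) (x : α) : List (List α) :=
  m.modify r (fun row => row.set c x)

-- the loop state of A: matrix, visited, noSwitches, negatives, positives, zeros
structure PvStA where
  m : List (List Int)
  vis : List (List Bool)
  ns : Int
  neg : Int
  pos : Int
  zer : Int

-- hasPositiveNeighbor, step for step ('prevCol >= 0' becomes '1 ≤ col' on Nat indices)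
def hasPositiveNeighbor (matrix : List (List Int)) (row col : Nat) (visited : List (List Bool)) : Bool :=
  let noRows := matrix.length
  let noCols := (matrix.headD []).length
  if decide (1 ≤ col) && !(pvGet2 false visited row (col-1)) && decide (pvGet2 0 matrix row (col-1) > 0) then true
  else if decide (col+1 < noCols) && !(pvGet2 false visited row (col+1)) && decide (pvGet2 0 matrix row (col+1) > 0) then true
  else if decide (1 ≤ row) && !(pvGet2 false visited (row-1) col) && decide (pvGet2 0 matrix (row-1) col > 0) then true
  else if decide (row+1 < noRows) && !(pvGet2 false visited (row+1) col) && decide (pvGet2 0 matrix (row+1) col > 0) then true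
  else false

-- one iteration of A's inner loop body
def pvStepA (st : PvStA) (rc : Nat × Nat) : PvStA :=
  let v := pvGet2 0 st.m rc.1 rc.2
  if v < 0 then
    let st1 : PvStA := { st with neg := st.neg + 1 }
    if hasPositiveNeighbor st1.m rc.1 rc.2 st1.vis then
      { st1 with m := pvSet2 st1.m rc.1 rc.2 (v * (-1)),
                 vis := pvSet2 st1.vis rc.1 rc.2 true,
                 ns := st1.ns + 1 }
    else st1
  else if v = 0 then { st with zer := st.zer + 1 }
  else { st with pos := st.pos + 1 }

def passThroughMatrix (matrix : List (List Int)) : Int × Int × Int × Int :=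
  let noRows := matrix.length
  let noCols := (matrix.headD []).length  -- len(matrix[0]); the IndexError on [] is outside Pre_
  let visited := List.replicate noRows (List.replicate noCols false)
  let st := (List.range noRows).foldl
    (fun st row => (List.range noCols).foldl (fun st col => pvStepA st (row, col)) st)
    ⟨matrix, visited, 0, 0, 0, 0⟩
  (st.ns, st.neg, st.pos, st.zer)

-- ===== PORT B =====
-- B-side helpers
def pvCells (rows cols : Nat) : List (Nat × Nat) :=
  (List.range rows).flatMap (fun r => (List.range cols).map (fun c => (r, c)))

-- B's pos(r, c): 0 <= r < rows and 0 <= c < cols and matrix[r][c] > 0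
def pvPos (matrix : List (List Int)) (rows cols : Nat) (r c : Int) : Bool :=
  decide (0 ≤ r) && decide (r < rows) && decide (0 ≤ c) && decide (c < cols) &&
    decide (pvGet2 0 matrix r.toNat c.toNat > 0)

def passThroughMatrix_alt (matrix : List (List Int)) : Int × Int × Int × Int :=
  let rows := matrix.length
  let cols := (matrix.headD []).length
  let cells := pvCells rows cols
  let negatives : Int := cells.countP (fun rc => decide (pvGet2 0 matrix rc.1 rc.2 < 0))
  let zeros : Int := cells.countP (fun rc => decide (pvGet2 0 matrix rc.1 rc.2 = 0))
  let positives : Int := (rows : Int) * (cols : Int) - negatives - zeros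
  let switchable := cells.filter (fun rc =>
    decide (pvGet2 0 matrix rc.1 rc.2 < 0) &&
      (pvPos matrix rows cols (rc.1 : Int) ((rc.2 : Int) - 1) ||
       pvPos matrix rows cols (rc.1 : Int) ((rc.2 : Int) + 1) ||
       pvPos matrix rows cols ((rc.1 : Int) - 1) (rc.2 : Int) ||
       pvPos matrix rows cols ((rc.1 : Int) + 1) (rc.2 : Int)))
  ((switchable.length : Int), negatives, positives, zeros)

-- ===== PRECONDITION & SPEC =====
-- Pre_ excludes exactly the inputs where Python A raises IndexError: the empty list
-- (matrix[0]) and matrices with a row shorter than row 0 (matrix[row][col] for col < len(matrix[0])).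
def Pre_passThroughMatrix (matrix : List (List Int)) : Prop :=
  matrix ≠ [] ∧ ∀ row ∈ matrix, (matrix.headD []).length ≤ row.length

instance (matrix : List (List Int)) : Decidable (Pre_passThroughMatrix matrix) := by
  unfold Pre_passThroughMatrix; infer_instance

def pvWitness_passThroughMatrix : List (List Int) := [[1, -2], [0, 3]]

def Spec_passThroughMatrix (matrix : List (List Int)) (out : Int × Int × Int × Int) : Prop := out = passThroughMatrix_alt matrix
instance (matrix : List (List Int)) (out : Int × Int × Int × Int) : Decidable (Spec_passThroughMatrix matrix out) := by unfold Spec_passThroughMatrix; infer_instance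

-- ===== CLAIM (what is proved, stated in full; the proofs are below) =====
def Claim_equal_passThroughMatrix : Prop := ∀ (matrix : List (List Int)), Dom_passThroughMatrix matrix → Pre_passThroughMatrix matrix → Spec_passThroughMatrix matrix (passThroughMatrix matrix)

-- ===== LEMMAS AND PROOFS =====

-- B's switch predicate (exactly the filter lambda of passThroughMatrix_alt)
def pvSwQ (M : List (List Int)) (rc : Nat × Nat) : Bool :=
  decide (pvGet2 0 M rc.1 rc.2 < 0) &&
    (pvPos M M.length (M.headD []).length (rc.1 : Int) ((rc.2 : Int) - 1) ||
     pvPos M M.length (M.headD []).length (rc.1 : Int) ((rc.2 : Int) + 1) ||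
     pvPos M M.length (M.headD []).length ((rc.1 : Int) - 1) (rc.2 : Int) ||
     pvPos M M.length (M.headD []).length ((rc.1 : Int) + 1) (rc.2 : Int))

-- loop invariant of A's scan after the cells in `done` have been processed
def pvInv (M : List (List Int)) (done : List (Nat × Nat)) (st : PvStA) : Prop :=
  st.m.length = M.length ∧
  (st.m.headD []).length = (M.headD []).length ∧
  (∀ r, (st.m.getD r []).length = (M.getD r []).length) ∧
  st.vis.length = M.length ∧
  (∀ r, r < M.length → (st.vis.getD r []).length = (M.headD []).length) ∧
  (∀ r c, r < M.length → c < (M.headD []).length →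
     pvGet2 0 st.m r c =
       (if ((r,c) ∈ done ∧ pvSwQ M (r,c) = true) then -(pvGet2 0 M r c) else pvGet2 0 M r c)) ∧
  (∀ r c, r < M.length → c < (M.headD []).length →
     (pvGet2 false st.vis r c = true ↔ ((r,c) ∈ done ∧ pvSwQ M (r,c) = true))) ∧
  st.ns = (done.countP (pvSwQ M) : Int) ∧
  st.neg = (done.countP (fun rc => decide (pvGet2 0 M rc.1 rc.2 < 0)) : Int) ∧
  st.pos = (done.countP (fun rc => decide (0 < pvGet2 0 M rc.1 rc.2)) : Int) ∧
  st.zer = (done.countP (fun rc => decide (pvGet2 0 M rc.1 rc.2 = 0)) : Int)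

theorem headD_eq_getD_zero {α : Type} (l : List α) (d : α) : l.headD d = l.getD 0 d := by
  cases l <;> rfl

theorem getD_set2 {α : Type} (m : List (List α)) (r c : Nat) (x : α) (r' : Nat) :
    (pvSet2 m r c x).getD r' [] = if r = r' then (m.getD r' []).set c x else m.getD r' [] := by
  unfold pvSet2
  rw [List.getD_eq_getElem?_getD, List.getElem?_modify]
  cases hm : m[r']? <;> simp [List.getD_eq_getElem?_getD, hm]

theorem pvGet2_set2 {α : Type} (d : α) (m : List (List α)) (r c : Nat) (x : α)
    (hc : c < (m.getD r []).length) (r' c' : Nat) :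
    pvGet2 d (pvSet2 m r c x) r' c' = if r = r' ∧ c = c' then x else pvGet2 d m r' c' := by
  unfold pvGet2
  rw [getD_set2]
  by_cases h : r = r'
  · subst h
    rw [if_pos rfl, List.getD_eq_getElem?_getD, List.getElem?_set]
    by_cases hcc : c = c'
    · subst hcc; rw [List.getD_eq_getElem?_getD] at hc; simp [hc]
    · simp [hcc, List.getD_eq_getElem?_getD]
  · simp [h]

theorem length_set2 {α : Type} (m : List (List α)) (r c : Nat) (x : α) :
    (pvSet2 m r c x).length = m.length := by
  unfold pvSet2; exact List.length_modify ..

theorem rowlen_set2 {α : Type} (m : List (List α)) (r c : Nat) (x : α) (r' : Nat) :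
    ((pvSet2 m r c x).getD r' []).length = (m.getD r' []).length := by
  rw [getD_set2]; split <;> simp

-- under the invariant, "unvisited and currently positive" is "originally positive"
theorem pvReadPos (M : List (List Int)) (done : List (Nat × Nat)) (st : PvStA)
    (h6 : ∀ r c, r < M.length → c < (M.headD []).length →
       pvGet2 0 st.m r c =
         (if ((r,c) ∈ done ∧ pvSwQ M (r,c) = true) then -(pvGet2 0 M r c) else pvGet2 0 M r c))
    (h7 : ∀ r c, r < M.length → c < (M.headD []).length →
       (pvGet2 false st.vis r c = true ↔ ((r,c) ∈ done ∧ pvSwQ M (r,c) = true)))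
    (r c : Nat) (hr : r < M.length) (hc : c < (M.headD []).length) :
    (!(pvGet2 false st.vis r c) && decide (pvGet2 0 st.m r c > 0)) =
      decide (0 < pvGet2 0 M r c) := by
  by_cases hd : ((r,c) ∈ done ∧ pvSwQ M (r,c) = true)
  · have hvis : pvGet2 false st.vis r c = true := (h7 r c hr hc).mpr hd
    have hneg : pvGet2 0 M r c < 0 := by
      have := hd.2
      unfold pvSwQ at this
      have := (Bool.and_eq_true ..).mp this |>.1
      exact of_decide_eq_true this
    simp [hvis]
    omega
  · have hvis : pvGet2 false st.vis r c = false := by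
      cases hv : pvGet2 false st.vis r c
      · rfl
      · exact absurd ((h7 r c hr hc).mp hv) hd
    rw [h6 r c hr hc, if_neg hd]
    simp [hvis]

theorem pvIfChain4 (a b c d : Bool) :
    (if a then true else if b then true else if c then true else if d then true else false)
      = (a || b || c || d) := by
  cases a <;> cases b <;> cases c <;> cases d <;> simp

-- under the invariant, A's neighbor check computes B's original-matrix neighbor check
theorem pvNeighbor_eq (M : List (List Int)) (done : List (Nat × Nat)) (st : PvStA)
    (hinv : pvInv M done st) (r c : Nat) (hr : r < M.length) (hc : c < (M.headD []).length) :
    hasPositiveNeighbor st.m r c st.vis =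
      (pvPos M M.length (M.headD []).length (r : Int) ((c : Int) - 1) ||
       pvPos M M.length (M.headD []).length (r : Int) ((c : Int) + 1) ||
       pvPos M M.length (M.headD []).length ((r : Int) - 1) (c : Int) ||
       pvPos M M.length (M.headD []).length ((r : Int) + 1) (c : Int)) := by
  obtain ⟨h1, h2, h3, h4, h5, h6, h7, _⟩ := hinv
  have key := pvReadPos M done st h6 h7
  have e1 : (decide (1 ≤ c) && (!(pvGet2 false st.vis r (c-1)) && decide (pvGet2 0 st.m r (c-1) > 0)))
      = pvPos M M.length (M.headD []).length (r : Int) ((c : Int) - 1) := by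
    by_cases hcz : 1 ≤ c
    · have hlt : c - 1 < (M.headD []).length := by omega
      rw [key r (c-1) hr hlt]
      unfold pvPos
      have ht : ((c : Int) - 1).toNat = c - 1 := by omega
      rw [Int.toNat_natCast, ht, Bool.eq_iff_iff]
      simp only [Bool.and_eq_true, decide_eq_true_iff]
      constructor
      · rintro ⟨-, hpos⟩
        refine ⟨⟨⟨⟨?_, ?_⟩, ?_⟩, ?_⟩, hpos⟩ <;> omega
      · rintro ⟨⟨⟨⟨-, -⟩, h3'⟩, -⟩, hpos⟩
        exact ⟨hcz, hpos⟩
    · unfold pvPos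
      rw [Bool.eq_iff_iff]
      simp only [Bool.and_eq_true, decide_eq_true_iff]
      constructor
      · rintro ⟨h', -⟩; omega
      · rintro ⟨⟨⟨⟨-, -⟩, h3'⟩, -⟩, -⟩; omega
  have e2 : (decide (c+1 < (st.m.headD []).length) && (!(pvGet2 false st.vis r (c+1)) && decide (pvGet2 0 st.m r (c+1) > 0)))
      = pvPos M M.length (M.headD []).length (r : Int) ((c : Int) + 1) := by
    rw [h2]
    by_cases hcb : c + 1 < (M.headD []).length
    · rw [key r (c+1) hr hcb]
      unfold pvPos
      have ht : ((c : Int) + 1).toNat = c + 1 := by omega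
      rw [Int.toNat_natCast, ht, Bool.eq_iff_iff]
      simp only [Bool.and_eq_true, decide_eq_true_iff]
      constructor
      · rintro ⟨-, hpos⟩
        refine ⟨⟨⟨⟨?_, ?_⟩, ?_⟩, ?_⟩, hpos⟩ <;> omega
      · rintro ⟨⟨⟨⟨-, -⟩, -⟩, h4'⟩, hpos⟩
        exact ⟨hcb, hpos⟩
    · unfold pvPos
      rw [Bool.eq_iff_iff]
      simp only [Bool.and_eq_true, Bool.not_eq_true', decide_eq_true_iff]
      constructor
      · rintro ⟨h', -⟩; omega
      · rintro ⟨⟨⟨⟨-, -⟩, -⟩, h4'⟩, -⟩; omega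
  have e3 : (decide (1 ≤ r) && (!(pvGet2 false st.vis (r-1) c) && decide (pvGet2 0 st.m (r-1) c > 0)))
      = pvPos M M.length (M.headD []).length ((r : Int) - 1) (c : Int) := by
    by_cases hrz : 1 ≤ r
    · have hlt : r - 1 < M.length := by omega
      rw [key (r-1) c hlt hc]
      unfold pvPos
      have ht : ((r : Int) - 1).toNat = r - 1 := by omega
      rw [Int.toNat_natCast, ht, Bool.eq_iff_iff]
      simp only [Bool.and_eq_true, decide_eq_true_iff]
      constructor
      · rintro ⟨-, hpos⟩
        refine ⟨⟨⟨⟨?_, ?_⟩, ?_⟩, ?_⟩, hpos⟩ <;> omega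
      · rintro ⟨⟨⟨⟨-, -⟩, -⟩, -⟩, hpos⟩
        exact ⟨hrz, hpos⟩
    · unfold pvPos
      rw [Bool.eq_iff_iff]
      simp only [Bool.and_eq_true, Bool.not_eq_true', decide_eq_true_iff]
      constructor
      · rintro ⟨h', -⟩; omega
      · rintro ⟨⟨⟨⟨h1', -⟩, -⟩, -⟩, -⟩; omega
  have e4 : (decide (r+1 < st.m.length) && (!(pvGet2 false st.vis (r+1) c) && decide (pvGet2 0 st.m (r+1) c > 0)))
      = pvPos M M.length (M.headD []).length ((r : Int) + 1) (c : Int) := by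
    rw [h1]
    by_cases hrb : r + 1 < M.length
    · rw [key (r+1) c hrb hc]
      unfold pvPos
      have ht : ((r : Int) + 1).toNat = r + 1 := by omega
      rw [Int.toNat_natCast, ht, Bool.eq_iff_iff]
      simp only [Bool.and_eq_true, decide_eq_true_iff]
      constructor
      · rintro ⟨-, hpos⟩
        refine ⟨⟨⟨⟨?_, ?_⟩, ?_⟩, ?_⟩, hpos⟩ <;> omega
      · rintro ⟨⟨⟨⟨-, h2'⟩, -⟩, -⟩, hpos⟩
        exact ⟨hrb, hpos⟩
    · unfold pvPos
      rw [Bool.eq_iff_iff]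
      simp only [Bool.and_eq_true, Bool.not_eq_true', decide_eq_true_iff]
      constructor
      · rintro ⟨h', -⟩; omega
      · rintro ⟨⟨⟨⟨-, h2'⟩, -⟩, -⟩, -⟩; omega
  unfold hasPositiveNeighbor
  simp only [← Bool.and_assoc] at e1 e2 e3 e4
  rw [pvIfChain4, e1, e2, e3, e4]

theorem pvMemApp (done : List (Nat × Nat)) (r c r' c' : Nat) :
    ((r',c') ∈ done ++ [(r,c)]) ↔ ((r',c') ∈ done ∨ (r' = r ∧ c' = c)) := by
  simp [Prod.ext_iff]

theorem pvCond_ext (M : List (List Int)) (done : List (Nat × Nat)) (r c r' c' : Nat)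
    (h : pvSwQ M (r,c) = false ∨ ¬(r = r' ∧ c = c')) :
    (((r',c') ∈ done ++ [(r,c)]) ∧ pvSwQ M (r',c') = true) ↔
      (((r',c') ∈ done) ∧ pvSwQ M (r',c') = true) := by
  constructor
  · rintro ⟨hm, hs⟩
    rcases (pvMemApp done r c r' c').mp hm with hm' | ⟨er, ec⟩
    · exact ⟨hm', hs⟩
    · subst er; subst ec
      rcases h with h | h
      · rw [h] at hs; cases hs
      · exact absurd ⟨rfl, rfl⟩ h
  · rintro ⟨hm, hs⟩
    exact ⟨List.mem_append_left _ hm, hs⟩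

theorem pvStep_inv (M : List (List Int)) (done : List (Nat × Nat)) (st : PvStA)
    (hlen : ∀ r' < M.length, (M.headD []).length ≤ (M.getD r' []).length)
    (r c : Nat) (hr : r < M.length) (hc : c < (M.headD []).length)
    (hnot : (r,c) ∉ done) (hinv : pvInv M done st) :
    pvInv M (done ++ [(r,c)]) (pvStepA st (r,c)) := by
  obtain ⟨h1, h2, h3, h4, h5, h6, h7, h8, h9, h10, h11⟩ := hinv
  have hcm : c < (st.m.getD r []).length := by
    rw [h3]; exact lt_of_lt_of_le hc (hlen r hr)
  have hcv : c < (st.vis.getD r []).length := by rw [h5 r hr]; exact hc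
  have hv : pvGet2 0 st.m r c = pvGet2 0 M r c := by
    rw [h6 r c hr hc, if_neg]; rintro ⟨hmem, -⟩; exact hnot hmem
  have hnb := pvNeighbor_eq M done st ⟨h1,h2,h3,h4,h5,h6,h7,h8,h9,h10,h11⟩ r c hr hc
  have hswq_eq : pvSwQ M (r,c) = (decide (pvGet2 0 M r c < 0) &&
      (pvPos M M.length (M.headD []).length (r : Int) ((c : Int) - 1) ||
       pvPos M M.length (M.headD []).length (r : Int) ((c : Int) + 1) ||
       pvPos M M.length (M.headD []).length ((r : Int) - 1) (c : Int) ||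
       pvPos M M.length (M.headD []).length ((r : Int) + 1) (c : Int))) := rfl
  unfold pvStepA
  dsimp only
  rw [hv]
  by_cases hvlt : pvGet2 0 M r c < 0
  · rw [if_pos hvlt]
    rw [hnb]
    by_cases hq : (pvPos M M.length (M.headD []).length (r : Int) ((c : Int) - 1) ||
       pvPos M M.length (M.headD []).length (r : Int) ((c : Int) + 1) ||
       pvPos M M.length (M.headD []).length ((r : Int) - 1) (c : Int) ||
       pvPos M M.length (M.headD []).length ((r : Int) + 1) (c : Int)) = true
    · -- the switch branch
      have hswq : pvSwQ M (r,c) = true := by rw [hswq_eq, hq]; simp [hvlt]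
      rw [if_pos hq]
      refine ⟨?_, ?_, ?_, ?_, ?_, ?_, ?_, ?_, ?_, ?_, ?_⟩ <;> dsimp only
      · rw [length_set2]; exact h1
      · rw [headD_eq_getD_zero, rowlen_set2, ← headD_eq_getD_zero]; exact h2
      · intro r'; rw [rowlen_set2]; exact h3 r'
      · rw [length_set2]; exact h4
      · intro r' hr'; rw [rowlen_set2]; exact h5 r' hr'
      · intro r' c' hr' hc'
        rw [pvGet2_set2 0 st.m r c _ hcm r' c']
        by_cases he : r = r' ∧ c = c'
        · rw [if_pos he]
          obtain ⟨er, ec⟩ := he; subst er; subst ec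
          rw [if_pos ⟨(pvMemApp done r c r c).mpr (Or.inr ⟨rfl, rfl⟩), hswq⟩]
          ring
        · rw [if_neg he, h6 r' c' hr' hc']
          exact (if_congr ((pvCond_ext M done r c r' c' (Or.inr he)).symm) rfl rfl)
      · intro r' c' hr' hc'
        rw [pvGet2_set2 false st.vis r c true hcv r' c']
        by_cases he : r = r' ∧ c = c'
        · rw [if_pos he]
          obtain ⟨er, ec⟩ := he; subst er; subst ec
          constructor
          · intro; exact ⟨(pvMemApp done r c r c).mpr (Or.inr ⟨rfl, rfl⟩), hswq⟩
          · intro; rfl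
        · rw [if_neg he, h7 r' c' hr' hc']
          exact ((pvCond_ext M done r c r' c' (Or.inr he)).symm)
      · rw [List.countP_append, h8]
        simp [hswq]
      · rw [List.countP_append, h9]
        simp [hvlt]
      · rw [List.countP_append, h10]
        have : ¬ (0 < pvGet2 0 M r c) := by omega
        simp [this]
      · rw [List.countP_append, h11]
        have : ¬ (pvGet2 0 M r c = 0) := by omega
        simp [this]
    · -- negative but no switch
      have hswq : pvSwQ M (r,c) = false := by
        rw [hswq_eq, eq_false_of_ne_true hq]
        simp
      rw [if_neg hq]
      refine ⟨h1, h2, h3, h4, h5, ?_, ?_, ?_, ?_, ?_, ?_⟩ <;> dsimp only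
      · intro r' c' hr' hc'
        rw [h6 r' c' hr' hc']
        exact (if_congr ((pvCond_ext M done r c r' c' (Or.inl hswq)).symm) rfl rfl)
      · intro r' c' hr' hc'
        rw [h7 r' c' hr' hc']
        exact ((pvCond_ext M done r c r' c' (Or.inl hswq)).symm)
      · rw [List.countP_append, h8]
        simp [hswq]
      · rw [List.countP_append, h9]
        simp [hvlt]
      · rw [List.countP_append, h10]
        have : ¬ (0 < pvGet2 0 M r c) := by omega
        simp [this]
      · rw [List.countP_append, h11]
        have : ¬ (pvGet2 0 M r c = 0) := by omega
        simp [this]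
  · rw [if_neg hvlt]
    have hswq : pvSwQ M (r,c) = false := by
      rw [hswq_eq]
      simp [hvlt]
    by_cases hvz : pvGet2 0 M r c = 0
    · rw [if_pos hvz]
      refine ⟨h1, h2, h3, h4, h5, ?_, ?_, ?_, ?_, ?_, ?_⟩ <;> dsimp only
      · intro r' c' hr' hc'
        rw [h6 r' c' hr' hc']
        exact (if_congr ((pvCond_ext M done r c r' c' (Or.inl hswq)).symm) rfl rfl)
      · intro r' c' hr' hc'
        rw [h7 r' c' hr' hc']
        exact ((pvCond_ext M done r c r' c' (Or.inl hswq)).symm)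
      · rw [List.countP_append, h8]
        simp [hswq]
      · rw [List.countP_append, h9]
        simp [hvlt]
      · rw [List.countP_append, h10]
        have : ¬ (0 < pvGet2 0 M r c) := by omega
        simp [this]
      · rw [List.countP_append, h11]
        simp [hvz]
    · rw [if_neg hvz]
      refine ⟨h1, h2, h3, h4, h5, ?_, ?_, ?_, ?_, ?_, ?_⟩ <;> dsimp only
      · intro r' c' hr' hc'
        rw [h6 r' c' hr' hc']
        exact (if_congr ((pvCond_ext M done r c r' c' (Or.inl hswq)).symm) rfl rfl)
      · intro r' c' hr' hc'
        rw [h7 r' c' hr' hc']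
        exact ((pvCond_ext M done r c r' c' (Or.inl hswq)).symm)
      · rw [List.countP_append, h8]
        simp [hswq]
      · rw [List.countP_append, h9]
        simp [hvlt]
      · rw [List.countP_append, h10]
        have : 0 < pvGet2 0 M r c := by omega
        simp [this]
      · rw [List.countP_append, h11]
        simp [hvz]

theorem pvFold_inv (M : List (List Int))
    (hlen : ∀ r' < M.length, (M.headD []).length ≤ (M.getD r' []).length) :
    ∀ (todo done : List (Nat × Nat)) (st : PvStA),
      pvInv M done st →
      (∀ p ∈ todo, p.1 < M.length ∧ p.2 < (M.headD []).length) →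
      (done ++ todo).Nodup →
      pvInv M (done ++ todo) (todo.foldl pvStepA st) := by
  intro todo
  induction todo with
  | nil => intro done st h _ _; simpa using h
  | cons p rest ih =>
    intro done st h hb hnd
    obtain ⟨r, c⟩ := p
    have hbp := hb (r, c) (List.mem_cons_self ..)
    have hnot : (r, c) ∉ done := by
      rcases List.nodup_append.mp hnd with ⟨-, -, hdis⟩
      intro hmem
      exact hdis _ hmem _ (List.mem_cons_self ..) rfl
    have hstep := pvStep_inv M done st hlen r c hbp.1 hbp.2 hnot h
    have hassoc : (done ++ [(r,c)]) ++ rest = done ++ (r,c) :: rest := by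
      rw [List.append_assoc]; rfl
    have := ih (done ++ [(r,c)]) (pvStepA st (r,c)) hstep
      (fun q hq => hb q (List.mem_cons_of_mem _ hq)) (by rw [hassoc]; exact hnd)
    rw [hassoc] at this
    simpa using this

theorem pvMem_cells (R C : Nat) (p : Nat × Nat) :
    p ∈ pvCells R C ↔ p.1 < R ∧ p.2 < C := by
  obtain ⟨r, c⟩ := p
  simp [pvCells]

theorem pvNodup_cells (R C : Nat) : (pvCells R C).Nodup := by
  rw [pvCells, List.nodup_flatMap]
  constructor
  · intro r _
    exact List.Nodup.map (fun a b h => by simpa using h) List.nodup_range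
  · refine List.Pairwise.imp ?_ List.pairwise_lt_range
    intro a b hab p hp hq
    simp only [List.mem_map, List.mem_range] at hp hq
    obtain ⟨c1, -, e1⟩ := hp
    obtain ⟨c2, -, e2⟩ := hq
    rw [← e1] at e2
    have : b = a := (Prod.mk.injEq ..).mp e2 |>.1
    omega

theorem pvLength_cells (R C : Nat) : (pvCells R C).length = R * C := by
  rw [pvCells, List.length_flatMap]
  induction R with
  | zero => simp
  | succ n ihn =>
    rw [List.range_succ, List.map_append, List.sum_append, ihn]
    simp [Nat.succ_mul]

theorem pvCountP_tri (M : List (List Int)) (l : List (Nat × Nat)) :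
    l.countP (fun rc => decide (pvGet2 0 M rc.1 rc.2 < 0)) +
      l.countP (fun rc => decide (pvGet2 0 M rc.1 rc.2 = 0)) +
      l.countP (fun rc => decide (0 < pvGet2 0 M rc.1 rc.2)) = l.length := by
  induction l with
  | nil => simp
  | cons p rest ih =>
    simp only [List.countP_cons, List.length_cons]
    rcases lt_trichotomy (pvGet2 0 M p.1 p.2) 0 with h | h | h
    · have h2 : ¬ (pvGet2 0 M p.1 p.2 = 0) := by omega
      have h3 : ¬ (0 < pvGet2 0 M p.1 p.2) := by omega
      simp [h, h2, h3]
      omega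
    · simp [h]
      omega
    · have h1 : ¬ (pvGet2 0 M p.1 p.2 < 0) := by omega
      have h2 : ¬ (pvGet2 0 M p.1 p.2 = 0) := by omega
      simp [h, h1, h2]
      omega

-- ===== VERDICT (by name: the statement is the Claim_ definition above) =====
theorem passThroughMatrix_spec : Claim_equal_passThroughMatrix := by
  intro matrix _ hpre
  obtain ⟨hne, hrows⟩ := hpre
  unfold Spec_passThroughMatrix
  have hlen : ∀ r' < matrix.length, (matrix.headD []).length ≤ (matrix.getD r' []).length := by
    intro r' hr'
    have hmem : matrix.getD r' [] ∈ matrix := by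
      rw [List.getD_eq_getElem matrix [] hr']; exact List.getElem_mem hr'
    exact hrows _ hmem
  have h0 : pvInv matrix []
      ⟨matrix, List.replicate matrix.length (List.replicate (matrix.headD []).length false),
        0, 0, 0, 0⟩ := by
    refine ⟨rfl, rfl, fun r => rfl, ?_, ?_, ?_, ?_, rfl, rfl, rfl, rfl⟩ <;> dsimp only
    · simp
    · intro r hr
      rw [List.getD_replicate _ hr]; simp
    · intro r c hr hc; simp
    · intro r c hr hc
      constructor
      · intro hv
        exfalso
        have hz : pvGet2 false
            (List.replicate matrix.length (List.replicate (matrix.headD []).length false)) r c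
              = false := by
          unfold pvGet2
          rw [List.getD_replicate _ hr, List.getD_replicate _ hc]
        rw [hz] at hv; cases hv
      · rintro ⟨h, -⟩; cases h
  have hfin := pvFold_inv matrix hlen
      (pvCells matrix.length (matrix.headD []).length) [] _ h0
      (fun p hp => (pvMem_cells ..).mp hp) (by simpa using pvNodup_cells ..)
  rw [List.nil_append] at hfin
  have hfold : (List.range matrix.length).foldl
      (fun st row => (List.range (matrix.headD []).length).foldl
        (fun st col => pvStepA st (row, col)) st)
      (⟨matrix, List.replicate matrix.length (List.replicate (matrix.headD []).length false),
        0, 0, 0, 0⟩ : PvStA)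
      = (pvCells matrix.length (matrix.headD []).length).foldl pvStepA
        ⟨matrix, List.replicate matrix.length (List.replicate (matrix.headD []).length false),
          0, 0, 0, 0⟩ := by
    rw [pvCells, List.foldl_flatMap]
    congr 1
    funext st r
    rw [List.foldl_map]
  obtain ⟨-, -, -, -, -, -, -, hns, hneg, hpos, hzer⟩ := hfin
  have htri := pvCountP_tri matrix (pvCells matrix.length (matrix.headD []).length)
  have hlencells := pvLength_cells matrix.length (matrix.headD []).length
  simp only [passThroughMatrix, passThroughMatrix_alt]
  rw [hfold]
  rw [hns, hneg, hpos, hzer]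
  have hsw : (List.filter
      (fun rc => decide (pvGet2 0 matrix rc.1 rc.2 < 0) &&
        (pvPos matrix matrix.length (matrix.headD []).length (rc.1 : Int) ((rc.2 : Int) - 1) ||
         pvPos matrix matrix.length (matrix.headD []).length (rc.1 : Int) ((rc.2 : Int) + 1) ||
         pvPos matrix matrix.length (matrix.headD []).length ((rc.1 : Int) - 1) (rc.2 : Int) ||
         pvPos matrix matrix.length (matrix.headD []).length ((rc.1 : Int) + 1) (rc.2 : Int)))
      (pvCells matrix.length (matrix.headD []).length)).length
      = List.countP (pvSwQ matrix) (pvCells matrix.length (matrix.headD []).length) := by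
    rw [List.countP_eq_length_filter]
    rfl
  rw [hsw]
  refine Prod.ext rfl (Prod.ext rfl (Prod.ext ?_ rfl))
  dsimp only
  omega
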